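-- pv_equiv track=rewrite | github.com/hyz218/codingtest_programmers | level_1/recommend_job.py | solution
-- ===== SOURCE A (Python) =====
-- def solution(table, languages, preference):
--     answer = [] #answer 초기화
--     score = [] #점수 초기화
--     job = [] #직업군 초기화
--
--     for i in range(len(table)): #table 길이만큼 도는 반복문
--         num = 0 #점수 계산 초기화
--         t = table[i].split(" ") #문장 분리
--         job.append(t[0]) #직업군 추가
--         for j in range(1,len(t)): #문장 길이만큼 도는 반복문
--             for l in range(len(languages)): #언어 길이만큼 도는 반복문
--                 if (languages[l]==t[j]): #언어와 문장에서 단어가 해당하는 문자가 같은 경우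
--                     num+=(5-j+1)*preference[l] #해당 가중치 곱하여 총점 덧셈
--         score.append(num) #점수 배열에 추가
--
--     for i in range(len(score)):
--         if (score[i]==max(score)): #점수가 최고값이라면 answer에 추가
--             answer.append(job[i])
--
--     answer.sort() #중복인 경우가 있으므로 answer 정렬
--     answer = answer[0] #사전순 정렬 후 가장 앞에 있는 값 return
--     return answer
-- ===== SOURCE B (Python) =====
-- def solution(table, languages, preference):
--     weight = {}
--     for lang, p in zip(languages, preference):
--         weight[lang] = weight.get(lang, 0) + p
--     best = None  # (score, job) running best: higher score wins, ties go to the smaller job name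
--     for row in table:
--         words = row.split(" ")
--         job = words[0]
--         s = 0
--         for j, w in enumerate(words[1:], 1):
--             s += (6 - j) * weight.get(w, 0)
--         if best is None or s > best[0] or (s == best[0] and job < best[1]):
--             best = (s, job)
--     return best[1]
-- ===== Notes on version B (the rewrite author's own statement) =====
-- stated objective: faster
-- what changed: B builds a language->weight dictionary once and keeps a single running best (score, job) pair with lexicographic tie-break, replacing A's per-word linear scan over all languages and its separate max/filter/sort passes over parallel score and job arrays.
import Mathlib
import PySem

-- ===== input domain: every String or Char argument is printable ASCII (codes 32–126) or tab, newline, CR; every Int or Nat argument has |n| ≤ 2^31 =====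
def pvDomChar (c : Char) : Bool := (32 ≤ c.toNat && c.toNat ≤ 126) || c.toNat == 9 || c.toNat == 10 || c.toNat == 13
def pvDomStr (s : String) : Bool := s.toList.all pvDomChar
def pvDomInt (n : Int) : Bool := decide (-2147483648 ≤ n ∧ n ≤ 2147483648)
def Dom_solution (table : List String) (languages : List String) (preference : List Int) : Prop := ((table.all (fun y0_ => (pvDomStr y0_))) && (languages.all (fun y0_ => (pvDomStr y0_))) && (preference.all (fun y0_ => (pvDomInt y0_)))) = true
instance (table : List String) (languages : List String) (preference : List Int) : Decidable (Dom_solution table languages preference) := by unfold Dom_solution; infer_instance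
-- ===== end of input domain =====

-- B replaces A's O(rows·words·languages) rescan plus max/filter/sort passes by a weight
-- dictionary built once and a single running-best fold (faster, one pass).

-- ===== PORT A =====
-- row.split(" "): sep " " is nonempty, so split? is always `some`; `.getD []` never fires.
-- t[0]: split with a separator always returns a nonempty list, so headD's default never fires.
-- preference[l] is read with a default: Python raises IndexError there exactly when
-- l ≥ len(preference) and the branch is taken, which Pre_solution excludes.
def solution (table : List String) (languages : List String) (preference : List Int) : String :=
  let acc := table.foldl (fun (acc : List String × List Int) row =>
      let t := (PySem.Str.split? row " ").getD []
      let num := (PySem.List.enumerate (t.drop 1) 1).foldl (fun num jw =>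
          (PySem.List.enumerate languages 0).foldl (fun num ll =>
              if ll.2 = jw.2 then num + (5 - jw.1 + 1) * PySem.List.pyGetD preference ll.1 0
              else num) num) 0
      (acc.1 ++ [t.headD ""], acc.2 ++ [num])) (([] : List String), ([] : List Int))
  let answer := (acc.2.zip acc.1).foldl (fun ans p =>
      if some p.1 = PySem.List.max? acc.2 (fun x => x) then ans ++ [p.2] else ans) []
  -- answer[0]: Python raises IndexError when answer is empty (only for table = [],
  -- where max(score) already raised ValueError); excluded by Pre_solution.
  (PySem.List.sorted answer (fun x => x) false).headD ""

-- ===== PORT B =====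
def solution_alt (table : List String) (languages : List String) (preference : List Int) : String :=
  let weight := (languages.zip preference).foldl
      (fun (d : PySem.Dict String Int) p => d.insert p.1 (d.getD p.1 0 + p.2)) PySem.Dict.empty
  let best := table.foldl (fun (best : Option (Int × String)) row =>
      let words := (PySem.Str.split? row " ").getD []
      let job := words.headD ""
      let s := (PySem.List.enumerate (words.drop 1) 1).foldl
          (fun s jw => s + (6 - jw.1) * weight.getD jw.2 0) 0
      match best with
      | none => some (s, job)
      | some b => if b.1 < s ∨ (s = b.1 ∧ job < b.2) then some (s, job) else some b) none
  match best with
  | some b => b.2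
  | none => ""   -- only for table = [], which Pre_solution excludes (Python B raises there)

-- ===== PRECONDITION & SPEC =====
-- Pre_ excludes exactly the inputs where A raises: an empty table (max([]) → ValueError,
-- answer[0] → IndexError) and inputs where a language whose index is ≥ len(preference)
-- occurs as a word (position ≥ 1) of some row (preference[l] → IndexError).
def Pre_solution (table : List String) (languages : List String) (preference : List Int) : Prop :=
  table ≠ [] ∧ ∀ l ∈ List.range languages.length, preference.length ≤ l →
    ∀ row ∈ table, languages[l]! ∉ ((PySem.Str.split? row " ").getD []).drop 1
instance (table : List String) (languages : List String) (preference : List Int) : Decidable (Pre_solution table languages preference) := by unfold Pre_solution; infer_instance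
def pvWitness_solution : List String × List String × List Int :=
  (["SI python java", "CONTENTS c python", "GAME c"], ["python", "c"], [5, 4])

def Spec_solution (table : List String) (languages : List String) (preference : List Int) (out : String) : Prop := out = solution_alt table languages preference
instance (table : List String) (languages : List String) (preference : List Int) (out : String) : Decidable (Spec_solution table languages preference out) := by unfold Spec_solution; infer_instance

-- ===== CLAIM (what is proved, stated in full; the proofs are below) =====
def Claim_equal_solution : Prop := ∀ (table : List String) (languages : List String) (preference : List Int), Dom_solution table languages preference → Pre_solution table languages preference → Spec_solution table languages preference (solution table languages preference)

-- ===== LEMMAS AND PROOFS =====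

-- total preference weight of the word w over an association list (languages zipped with preference)
def pvWsum (zs : List (String × Int)) (w : String) : Int :=
  ((zs.filter (fun p => p.1 = w)).map (·.2)).sum

-- the weight dict of port B looks up pvWsum
theorem pv_dict_wsum (zs : List (String × Int)) (d : PySem.Dict String Int) (w : String) :
    (zs.foldl (fun d p => d.insert p.1 (d.getD p.1 0 + p.2)) d).getD w 0
      = d.getD w 0 + pvWsum zs w := by
  induction zs generalizing d with
  | nil => simp [pvWsum]
  | cons z zs ih =>
    simp only [List.foldl_cons, ih, pvWsum, List.filter_cons]
    rw [PySem.Dict.getD_insert]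
    by_cases h : z.1 = w
    · simp [h]; ring
    · simp [h, Ne.symm h]

theorem pv_enumerate_shift {α : Type} (xs : List α) (s : Int) :
    PySem.List.enumerate xs (s + 1)
      = (PySem.List.enumerate xs s).map (fun p => (p.1 + 1, p.2)) := by
  induction xs generalizing s with
  | nil => simp [PySem.List.enumerate]
  | cons x xs ih => simp [PySem.List.enumerate_cons, ih]

theorem pv_foldl_ite_add {α : Type} (xs : List α) (p : α → Prop) [DecidablePred p]
    (f : α → Int) (init : Int) :
    xs.foldl (fun a x => if p x then a + f x else a) init
      = init + ((xs.map (fun x => if p x then f x else 0))).sum := by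
  rw [PySem.List.foldl_congr_mem xs _ (fun a x => a + (if p x then f x else 0)) init
    (by intro a x _; by_cases h : p x <;> simp [h]), PySem.List.foldl_add]

-- the enumerate-indexed preference sum equals pvWsum of the zip when every match is in range
theorem pv_sum_eq_wsum (L : List String) (P : List Int) (w : String)
    (Hw : ∀ k, (h : k < L.length) → L[k] = w → k < P.length) :
    ((PySem.List.enumerate L 0).map
        (fun kl => if kl.2 = w then PySem.List.pyGetD P kl.1 0 else 0)).sum
      = pvWsum (L.zip P) w := by
  induction L generalizing P with
  | nil => simp [PySem.List.enumerate, pvWsum]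
  | cons l L ih =>
    rw [PySem.List.enumerate_cons, show (0:Int) + 1 = 0 + 1 by rfl, pv_enumerate_shift]
    match P with
    | [] =>
      have hl : ¬ (l = w) := fun h => absurd (Hw 0 (by simp) h) (by simp)
      simp only [List.map_cons, List.map_map, List.sum_cons, hl, List.zip_nil_right,
        pvWsum, List.filter_nil, List.map_nil, List.sum_nil]
      rw [List.sum_eq_zero]
      · simp
      · intro x hx
        simp only [List.mem_map, Function.comp] at hx
        obtain ⟨kl, hkl, rfl⟩ := hx
        rw [PySem.List.mem_enumerate_iff] at hkl
        obtain ⟨k, hk, rfl⟩ := hkl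
        have : ¬ (L[k] = w) := fun h => absurd (Hw (k+1) (by simpa using hk) (by simpa using h)) (by simp)
        simp [this]
    | p :: P' =>
      have htail : ((PySem.List.enumerate L 0).map
            ((fun kl => if kl.2 = w then PySem.List.pyGetD (p :: P') kl.1 0 else 0) ∘
              (fun q => (q.1 + 1, q.2)))).sum
          = ((PySem.List.enumerate L 0).map
            (fun kl => if kl.2 = w then PySem.List.pyGetD P' kl.1 0 else 0)).sum := by
        apply congrArg
        apply List.map_congr_left
        intro kl hkl
        rw [PySem.List.mem_enumerate_iff] at hkl
        obtain ⟨k, hk, rfl⟩ := hkl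
        simp only [Function.comp]
        have h1 : ((0:Int) + k) + 1 = ((k + 1 : Nat) : Int) := by omega
        have h2 : (0:Int) + k = ((k : Nat) : Int) := by omega
        rw [h1, h2, PySem.List.pyGetD_natCast, PySem.List.pyGetD_natCast]
        simp
      have hw' : ∀ k, (h : k < L.length) → L[k] = w → k < P'.length := by
        intro k hk hlk
        have := Hw (k+1) (by simpa using hk) (by simpa using hlk)
        simpa using this
      simp only [List.map_cons, List.map_map, List.sum_cons, htail, ih P' hw']
      by_cases h : l = w
      · simp [h, pvWsum, PySem.List.pyGetD_zero_cons]
      · simp [h, pvWsum]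

-- A's inner double loop over one word, as init + weight
theorem pv_inner_loop (languages : List String) (preference : List Int) (w : String)
    (c init : Int)
    (Hw : ∀ k, (h : k < languages.length) → languages[k] = w → k < preference.length) :
    (PySem.List.enumerate languages 0).foldl
        (fun num ll => if ll.2 = w then num + c * PySem.List.pyGetD preference ll.1 0 else num) init
      = init + c * pvWsum (languages.zip preference) w := by
  rw [pv_foldl_ite_add]
  have : ((PySem.List.enumerate languages 0).map
        (fun ll => if ll.2 = w then c * PySem.List.pyGetD preference ll.1 0 else 0)).sum
      = ((PySem.List.enumerate languages 0).map
        (fun ll => c * (if ll.2 = w then PySem.List.pyGetD preference ll.1 0 else 0))).sum := by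
    apply congrArg; apply List.map_congr_left; intro kl _; split <;> simp
  rw [this, List.sum_map_mul_left, pv_sum_eq_wsum languages preference w Hw]

-- best-of list characterisation
def pvIsBest (rows : List (Int × String)) (M : Int) (J : String) : Prop :=
  (M, J) ∈ rows ∧ (∀ p ∈ rows, p.1 ≤ M) ∧ (∀ p ∈ rows, p.1 = M → J ≤ p.2)

theorem pv_best_unique {rows : List (Int × String)} {M1 M2 : Int} {J1 J2 : String}
    (h1 : pvIsBest rows M1 J1) (h2 : pvIsBest rows M2 J2) : M1 = M2 ∧ J1 = J2 := by
  obtain ⟨m1, b1, s1⟩ := h1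
  obtain ⟨m2, b2, s2⟩ := h2
  have hM : M1 = M2 := le_antisymm (b2 _ m1) (b1 _ m2)
  subst hM
  exact ⟨rfl, le_antisymm (s1 _ m2 rfl) (s2 _ m1 rfl)⟩

-- the running-best fold of port B computes pvIsBest
-- the selection step of port B's running-best fold
def pvSel (best : Option (Int × String)) (r : Int × String) : Option (Int × String) :=
  match best with
  | none => some (r.1, r.2)
  | some b => if b.1 < r.1 ∨ (r.1 = b.1 ∧ r.2 < b.2) then some (r.1, r.2) else some b

theorem pvSel_some (s : Int) (j : String) (r : Int × String) :
    pvSel (some (s, j)) r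
      = if s < r.1 ∨ (r.1 = s ∧ r.2 < j) then some (r.1, r.2) else some (s, j) := rfl

theorem pv_foldB_best (rows : List (Int × String)) (s : Int) (j : String) :
    ∃ M J, rows.foldl pvSel (some (s, j)) = some (M, J) ∧ pvIsBest ((s, j) :: rows) M J := by
  induction rows generalizing s j with
  | nil =>
    refine ⟨s, j, rfl, ?_⟩
    unfold pvIsBest
    exact ⟨by simp, by simp, by simp⟩
  | cons r rows ih =>
    by_cases hc : s < r.1 ∨ (r.1 = s ∧ r.2 < j)
    · obtain ⟨M, J, hfold, hbest⟩ := ih r.1 r.2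
      unfold pvIsBest at hbest
      obtain ⟨hmem, hbound, hmin⟩ := hbest
      have hr : r.1 ≤ M := hbound (r.1, r.2) (by simp)
      refine ⟨M, J, ?_, ?_, ?_, ?_⟩
      · rw [List.foldl_cons, pvSel_some, if_pos hc]; exact hfold
      · rcases List.mem_cons.1 hmem with h | h
        · exact List.mem_cons_of_mem _ (List.mem_cons.2 (Or.inl (by simpa using h)))
        · exact List.mem_cons_of_mem _ (List.mem_cons_of_mem _ h)
      · intro p hp
        rcases List.mem_cons.1 hp with h | hp
        · rw [h]
          rcases hc with h' | ⟨h', _⟩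
          · exact le_of_lt (lt_of_lt_of_le h' hr)
          · exact h' ▸ hr
        · rcases List.mem_cons.1 hp with h | hp
          · rw [h]; exact hr
          · exact hbound p (List.mem_cons_of_mem _ hp)
      · intro p hp hpM
        rcases List.mem_cons.1 hp with h | hp
        · -- p = (s, j): the displaced old best
          rw [h] at hpM ⊢
          simp only at hpM ⊢
          rcases hc with h' | ⟨h', hlt⟩
          · omega
          · have : J ≤ r.2 := hmin (r.1, r.2) (by simp) (by omega)
            exact le_of_lt (lt_of_le_of_lt this hlt)
        · rcases List.mem_cons.1 hp with h | hp
          · rw [h] at hpM ⊢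
            exact hmin (r.1, r.2) (by simp) hpM
          · exact hmin p (List.mem_cons_of_mem _ hp) hpM
    · obtain ⟨M, J, hfold, hbest⟩ := ih s j
      unfold pvIsBest at hbest
      obtain ⟨hmem, hbound, hmin⟩ := hbest
      have hsM : s ≤ M := hbound (s, j) (by simp)
      have hrs : r.1 ≤ s := by
        rcases le_or_gt r.1 s with h | h
        · exact h
        · exact absurd (Or.inl h) hc
      refine ⟨M, J, ?_, ?_, ?_, ?_⟩
      · rw [List.foldl_cons, pvSel_some, if_neg hc]; exact hfold
      · rcases List.mem_cons.1 hmem with h | h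
        · exact List.mem_cons.2 (Or.inl h)
        · exact List.mem_cons_of_mem _ (List.mem_cons_of_mem _ h)
      · intro p hp
        rcases List.mem_cons.1 hp with h | hp
        · rw [h]; exact hsM
        · rcases List.mem_cons.1 hp with h | hp
          · rw [h]; exact le_trans hrs hsM
          · exact hbound p (List.mem_cons_of_mem _ hp)
      · intro p hp hpM
        rcases List.mem_cons.1 hp with h | hp
        · rw [h] at hpM ⊢
          exact hmin (s, j) (by simp) hpM
        · rcases List.mem_cons.1 hp with h | hp
          · rw [h] at hpM ⊢
            have hs : s = M := le_antisymm hsM (hpM ▸ hrs)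
            have hJj : J ≤ j := hmin (s, j) (by simp) hs
            have hjr : j ≤ r.2 := by
              rcases le_or_gt j r.2 with h' | h'
              · exact h'
              · exact absurd (Or.inr ⟨by omega, h'⟩) hc
            exact le_trans hJj hjr
          · exact hmin p (List.mem_cons_of_mem _ hp) hpM

-- per-row pieces of the two ports, named for the bridging lemmas
def pvT (row : String) : List String := (PySem.Str.split? row " ").getD []

def pvNumA (languages : List String) (preference : List Int) (row : String) : Int :=
  (PySem.List.enumerate ((pvT row).drop 1) 1).foldl (fun num jw =>
      (PySem.List.enumerate languages 0).foldl (fun num ll =>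
          if ll.2 = jw.2 then num + (5 - jw.1 + 1) * PySem.List.pyGetD preference ll.1 0
          else num) num) 0

def pvWt (languages : List String) (preference : List Int) : PySem.Dict String Int :=
  (languages.zip preference).foldl
    (fun (d : PySem.Dict String Int) p => d.insert p.1 (d.getD p.1 0 + p.2)) PySem.Dict.empty

def pvSB (languages : List String) (preference : List Int) (row : String) : Int :=
  (PySem.List.enumerate ((pvT row).drop 1) 1).foldl
    (fun s jw => s + (6 - jw.1) * (pvWt languages preference).getD jw.2 0) 0

-- A's tail computation (max, filter, sort, head) on the list of (score, job) rows
def pvGenA (rows : List (Int × String)) : String :=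
  let answer := rows.foldl (fun ans p =>
      if some p.1 = PySem.List.max? (rows.map (·.1)) (fun x => x) then ans ++ [p.2] else ans) []
  (PySem.List.sorted answer (fun x => x) false).headD ""

theorem pv_solution_eq_genA (table : List String) (languages : List String) (preference : List Int) :
    solution table languages preference
      = pvGenA (table.map (fun row => (pvNumA languages preference row, (pvT row).headD ""))) := by
  have hacc : table.foldl (fun (acc : List String × List Int) row =>
        (acc.1 ++ [(pvT row).headD ""], acc.2 ++ [pvNumA languages preference row]))
        (([] : List String), ([] : List Int))
      = (table.map (fun r => (pvT r).headD ""), table.map (fun r => pvNumA languages preference r)) := by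
    refine (PySem.List.foldl_prod_mk (fun a r => a ++ [(pvT r).headD ""])
      (fun a r => a ++ [pvNumA languages preference r]) table [] []).trans ?_
    rw [PySem.List.foldl_append_singleton_eq_map, PySem.List.foldl_append_singleton_eq_map]
    simp
  show (let acc := table.foldl (fun (acc : List String × List Int) row =>
          (acc.1 ++ [(pvT row).headD ""], acc.2 ++ [pvNumA languages preference row]))
          (([] : List String), ([] : List Int))
        let answer := (acc.2.zip acc.1).foldl (fun ans p =>
          if some p.1 = PySem.List.max? acc.2 (fun x => x) then ans ++ [p.2] else ans) []
        (PySem.List.sorted answer (fun x => x) false).headD "") = _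
  simp only [hacc, List.zip_map', List.map_map, pvGenA]
  rfl

theorem pv_genA_best (rows : List (Int × String)) (h : rows ≠ []) :
    ∃ M J, pvGenA rows = J ∧ pvIsBest rows M J := by
  obtain ⟨M, hM⟩ : ∃ M, PySem.List.max? (rows.map (·.1)) (fun x => x) = some M := by
    cases h' : PySem.List.max? (rows.map (·.1)) (fun x => x) with
    | none => rw [PySem.List.max?_eq_none_iff] at h'; simp [List.map_eq_nil_iff] at h'; exact absurd h' h
    | some m => exact ⟨m, rfl⟩
  have hfold : rows.foldl (fun ans p =>
        if some p.1 = PySem.List.max? (rows.map (·.1)) (fun x => x) then ans ++ [p.2] else ans) []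
      = (rows.filter (fun p => p.1 == M)).map (·.2) := by
    rw [PySem.List.foldl_congr_mem rows _
      (fun ans p => if (fun (q : Int × String) => q.1 == M) p = true then ans ++ [p.2] else ans) []
      (by intro acc x _; rw [hM]; simp), PySem.List.foldl_append_if]
    simp
  obtain ⟨q, hq, hqM⟩ : ∃ q ∈ rows, q.1 = M := by
    have := PySem.List.max?_mem hM
    obtain ⟨q, hq, hq1⟩ := List.mem_map.1 this
    exact ⟨q, hq, hq1⟩
  have hans_ne : (rows.filter (fun p => p.1 == M)).map (·.2) ≠ [] := by
    simp only [ne_eq, List.map_eq_nil_iff, List.filter_eq_nil_iff, not_forall]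
    exact ⟨q, hq, by simp [hqM]⟩
  cases hs : PySem.List.sorted ((rows.filter (fun p => p.1 == M)).map (·.2)) (fun x => x) false with
  | nil => rw [PySem.List.sorted_eq_nil_iff] at hs; exact absurd hs hans_ne
  | cons J t =>
    refine ⟨M, J, ?_, ?_, ?_, ?_⟩
    · simp only [pvGenA, hfold, hs, List.headD_cons]
    · have hJ : J ∈ (rows.filter (fun p => p.1 == M)).map (·.2) := by
        rw [← PySem.List.mem_sorted _ (fun x => x) false, hs]; exact List.mem_cons_self
      obtain ⟨p, hp, hp2⟩ := List.mem_map.1 hJ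
      have := List.of_mem_filter hp
      have hp' := List.mem_of_mem_filter hp
      have : p = (M, J) := by
        apply Prod.ext
        · simpa using List.of_mem_filter hp
        · exact hp2
      exact this ▸ hp'
    · intro p hp
      have : p.1 ∈ rows.map (·.1) := List.mem_map.2 ⟨p, hp, rfl⟩
      exact PySem.List.max?_isMax hM _ this
    · intro p hp hpM
      have hpf : p ∈ rows.filter (fun p => p.1 == M) := List.mem_filter.2 ⟨hp, by simp [hpM]⟩
      have hp2 : p.2 ∈ (rows.filter (fun p => p.1 == M)).map (·.2) := List.mem_map.2 ⟨p, hpf, rfl⟩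
      exact PySem.List.key_head_sorted_le _ (fun x => x) hs _ hp2

theorem pv_row_eq (languages : List String) (preference : List Int) (row : String)
    (Hrow : ∀ l ∈ List.range languages.length, preference.length ≤ l →
      languages[l]! ∉ (pvT row).drop 1) :
    pvNumA languages preference row = pvSB languages preference row := by
  unfold pvNumA pvSB
  apply PySem.List.foldl_congr_mem
  intro acc jw hjw
  have hw : jw.2 ∈ (pvT row).drop 1 := by
    rw [PySem.List.mem_enumerate_iff] at hjw
    obtain ⟨k, hk, rfl⟩ := hjw
    exact List.getElem_mem hk
  have Hw : ∀ k, (h : k < languages.length) → languages[k] = jw.2 → k < preference.length := by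
    intro k hk hlk
    by_contra hge
    have hmem := Hrow k (List.mem_range.2 hk) (by omega)
    rw [List.getElem!_eq_getElem?_getD, List.getElem?_eq_getElem hk] at hmem
    simp only [Option.getD_some] at hmem
    exact hmem (hlk ▸ hw)
  rw [pv_inner_loop languages preference jw.2 (5 - jw.1 + 1) acc Hw,
    show pvWt languages preference
      = (languages.zip preference).foldl
          (fun (d : PySem.Dict String Int) p => d.insert p.1 (d.getD p.1 0 + p.2))
          PySem.Dict.empty from rfl,
    pv_dict_wsum]
  have : (PySem.Dict.empty : PySem.Dict String Int).getD jw.2 0 = 0 := by rfl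
  rw [this]
  ring

theorem pv_alt_eq (table : List String) (languages : List String) (preference : List Int)
    (r0 : String) (rest : List String) (htab : table = r0 :: rest) :
    ∃ M J, solution_alt table languages preference = J
      ∧ pvIsBest (table.map (fun row => (pvSB languages preference row, (pvT row).headD ""))) M J := by
  subst htab
  obtain ⟨M, J, hfold, hbest⟩ :=
    pv_foldB_best (rest.map (fun row => (pvSB languages preference row, (pvT row).headD "")))
      (pvSB languages preference r0) ((pvT r0).headD "")
  refine ⟨M, J, ?_, hbest⟩
  show (match (r0 :: rest).foldl (fun (best : Option (Int × String)) row =>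
      let words := (PySem.Str.split? row " ").getD []
      let job := words.headD ""
      let s := (PySem.List.enumerate (words.drop 1) 1).foldl
          (fun s jw => s + (6 - jw.1) * (pvWt languages preference).getD jw.2 0) 0
      match best with
      | none => some (s, job)
      | some b => if b.1 < s ∨ (s = b.1 ∧ job < b.2) then some (s, job) else some b) none with
    | some b => b.2
    | none => "") = J
  have hstep : (r0 :: rest).foldl (fun (best : Option (Int × String)) row =>
      let words := (PySem.Str.split? row " ").getD []
      let job := words.headD ""
      let s := (PySem.List.enumerate (words.drop 1) 1).foldl
          (fun s jw => s + (6 - jw.1) * (pvWt languages preference).getD jw.2 0) 0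
      match best with
      | none => some (s, job)
      | some b => if b.1 < s ∨ (s = b.1 ∧ job < b.2) then some (s, job) else some b) none
      = (rest.map (fun row => (pvSB languages preference row, (pvT row).headD ""))).foldl
        pvSel (some (pvSB languages preference r0, (pvT r0).headD "")) := by
    rw [List.foldl_cons, List.foldl_map]
    rfl
  rw [hstep, hfold]

-- ===== VERDICT (by name: the statement is the Claim_ definition above) =====
theorem solution_spec : Claim_equal_solution := by
  unfold Claim_equal_solution
  intro table languages preference _ hpre
  obtain ⟨hne, hP⟩ := hpre
  unfold Spec_solution
  obtain ⟨r0, rest, rfl⟩ : ∃ r0 rest, table = r0 :: rest := by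
    cases table with
    | nil => exact absurd rfl hne
    | cons a l => exact ⟨a, l, rfl⟩
  rw [pv_solution_eq_genA]
  have hmapeq : (r0 :: rest).map (fun row => (pvNumA languages preference row, (pvT row).headD ""))
      = (r0 :: rest).map (fun row => (pvSB languages preference row, (pvT row).headD "")) := by
    apply List.map_congr_left
    intro row hrow
    have := pv_row_eq languages preference row (fun l hl hle => hP l hl hle row hrow)
    rw [this]
  rw [hmapeq]
  obtain ⟨M, J, hB, hbestB⟩ := pv_alt_eq (r0 :: rest) languages preference r0 rest rfl
  obtain ⟨M', J', hA, hbestA⟩ := pv_genA_best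
    ((r0 :: rest).map (fun row => (pvSB languages preference row, (pvT row).headD ""))) (by simp)
  rw [hA, hB]
  exact (pv_best_unique hbestA hbestB).2
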